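-- pv_equiv track=rewrite | github.com/dsousart/cadastro-produtos | core/normalize_to_markdown.py | _extract_useful_blocks
-- ===== SOURCE A (Python) =====
-- def _extract_useful_blocks(text: str) -> str:
--     keep_markers = [
--         "fabric",
--         "details",
--         "materials",
--         "material",
--         "care",
--         "fit",
--         "features",
--         "benefits",
--         "temperature",
--         "odor",
--         "anti-odor",
--         "breath",
--         "breathable",
--         "moisture",
--         "merino",
--         "wool",
--         "fiber",
--         "micron",
--         "gsm",
--         "gramatura",
--     ]
--     lines = [line.strip() for line in text.splitlines() if line.strip()]
--     blocks = []
--     current = []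
--     for line in lines:
--         if any(marker in line.lower() for marker in keep_markers):
--             current.append(line)
--         else:
--             if current:
--                 blocks.append(" ".join(current))
--                 current = []
--     if current:
--         blocks.append(" ".join(current))
--     if not blocks:
--         return text
--     return " ".join(blocks)
-- ===== SOURCE B (Python) =====
-- _KEEP_MARKERS = [
--     "fabric", "details", "materials", "material", "care", "fit", "features",
--     "benefits", "temperature", "odor", "anti-odor", "breath", "breathable",
--     "moisture", "merino", "wool", "fiber", "micron", "gsm", "gramatura",
-- ]
--
--
-- def _extract_useful_blocks(text: str) -> str:
--     # Space-joining the space-joined blocks is the same as space-joining all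
--     # kept lines: the grouping is irrelevant to the output.
--     kept = []
--     for line in text.splitlines():
--         stripped = line.strip()
--         if stripped and any(marker in stripped.lower() for marker in _KEEP_MARKERS):
--             kept.append(stripped)
--     return " ".join(kept) if kept else text
-- ===== Notes on version B (the rewrite author's own statement) =====
-- stated objective: simpler
-- what changed: Drops the blocks/current grouping state machine entirely: since space-joining the space-joined blocks equals space-joining all kept lines, B collects kept lines in a single flat pass and joins once.
import Mathlib
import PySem

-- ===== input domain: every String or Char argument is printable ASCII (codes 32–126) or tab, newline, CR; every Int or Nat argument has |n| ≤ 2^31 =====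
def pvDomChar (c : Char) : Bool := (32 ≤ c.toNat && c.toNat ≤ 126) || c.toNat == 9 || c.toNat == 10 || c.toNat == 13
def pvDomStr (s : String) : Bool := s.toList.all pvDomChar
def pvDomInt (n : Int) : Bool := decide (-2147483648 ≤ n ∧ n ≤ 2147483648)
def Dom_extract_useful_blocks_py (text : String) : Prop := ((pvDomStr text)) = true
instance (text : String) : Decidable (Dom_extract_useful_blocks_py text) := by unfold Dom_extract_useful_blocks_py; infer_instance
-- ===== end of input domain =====

-- B replaces A's blocks/current grouping state machine by one flat pass collecting kept
-- lines and a single space-join (the grouping is irrelevant to the joined output): simpler.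

-- ===== PORT A =====
-- the module-level marker list (shared data, identical in both Pythons)
def pvMarkers : List String :=
  ["fabric", "details", "materials", "material", "care", "fit", "features",
   "benefits", "temperature", "odor", "anti-odor", "breath", "breathable",
   "moisture", "merino", "wool", "fiber", "micron", "gsm", "gramatura"]

-- any(marker in line.lower() for marker in keep_markers)  (same genexp in both Pythons)
def pvHasMarker (line : String) : Bool :=
  pvMarkers.any (fun m => PySem.Str.isIn m (PySem.Str.lower line))

-- the body of A's for-loop over `lines`, state = (blocks, current)
def pvStepA (st : List String × List String) (line : String) : List String × List String :=
  if pvHasMarker line then (st.1, st.2 ++ [line])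
  else if st.2 ≠ [] then (st.1 ++ [PySem.Str.join " " st.2], []) else st

def extract_useful_blocks_py (text : String) : String :=
  let lines := ((PySem.Str.splitlines text).filter
      (fun line => PySem.Str.strip line != "")).map PySem.Str.strip
  let st := lines.foldl pvStepA ([], [])
  let blocks := if st.2 ≠ [] then st.1 ++ [PySem.Str.join " " st.2] else st.1
  if blocks = [] then text else PySem.Str.join " " blocks

-- ===== PORT B =====
-- B's loop body: the stripped line if it is nonempty and carries a marker, else nothing
def pvKeepB (line : String) : Option String :=
  let stripped := PySem.Str.strip line
  if stripped != "" && pvHasMarker stripped then some stripped else none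

def extract_useful_blocks_py_alt (text : String) : String :=
  let kept := (PySem.Str.splitlines text).filterMap pvKeepB
  if kept = [] then text else PySem.Str.join " " kept

-- ===== PRECONDITION & SPEC =====
def Spec_extract_useful_blocks_py (text : String) (out : String) : Prop := out = extract_useful_blocks_py_alt text
instance (text : String) (out : String) : Decidable (Spec_extract_useful_blocks_py text out) := by unfold Spec_extract_useful_blocks_py; infer_instance

-- ===== CLAIM (what is proved, stated in full; the proofs are below) =====
def Claim_equal_extract_useful_blocks_py : Prop := ∀ (text : String), Dom_extract_useful_blocks_py text → Spec_extract_useful_blocks_py text (extract_useful_blocks_py text)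

-- ===== LEMMAS AND PROOFS =====

-- the final `if current: blocks.append(" ".join(current))` flush, as a function of the state
def pvFlush (st : List String × List String) : List String :=
  if st.2 ≠ [] then st.1 ++ [PySem.Str.join " " st.2] else st.1

-- B's kept lines are exactly A's stripped nonempty lines that carry a marker
theorem pv_kept_eq (ls : List String) :
    ls.filterMap pvKeepB
    = ((ls.filter (fun line => PySem.Str.strip line != "")).map PySem.Str.strip).filter
        pvHasMarker := by
  induction ls with
  | nil => rfl
  | cons l ls ih =>
    rw [List.filterMap_cons, List.filter_cons]
    by_cases h1 : PySem.Str.strip l = "" <;> by_cases h2 : pvHasMarker (PySem.Str.strip l)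
    · have hb : pvKeepB l = none := by simp [pvKeepB, h1]
      rw [hb]; simp [h1, ih]
    · have hb : pvKeepB l = none := by simp [pvKeepB, h1]
      rw [hb]; simp [h1, ih]
    · have hb : pvKeepB l = some (PySem.Str.strip l) := by simp [pvKeepB, h1, h2]
      rw [hb]; simp [h1, h2, ih]
    · have hb : pvKeepB l = none := by simp [pvKeepB, h2]
      rw [hb]; simp [h1, h2, ih]

theorem pv_cjoin_append (sep : List Char) (ps qs : List (List Char))
    (hp : ps ≠ []) (hq : qs ≠ []) :
    PySem.Chars.join sep (ps ++ qs)
      = PySem.Chars.join sep ps ++ sep ++ PySem.Chars.join sep qs := by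
  induction ps with
  | nil => exact absurd rfl hp
  | cons x ps ih =>
    cases ps with
    | nil =>
      cases qs with
      | nil => exact absurd rfl hq
      | cons q qs =>
        simp [PySem.Chars.join_cons_cons, PySem.Chars.join_singleton]
    | cons y ps' =>
      have h := ih (by simp)
      simp only [List.cons_append] at h ⊢
      rw [PySem.Chars.join_cons_cons sep x y (ps' ++ qs),
        PySem.Chars.join_cons_cons sep x y ps', h]
      simp

theorem pv_cjoin_two (sep : List Char) (X : List (List Char)) (a b : List Char) :
    PySem.Chars.join sep (X ++ [a, b]) = PySem.Chars.join sep (X ++ [a ++ sep ++ b]) := by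
  cases X with
  | nil => simp [PySem.Chars.join_cons_cons, PySem.Chars.join_singleton]
  | cons x xs =>
    rw [pv_cjoin_append sep (x :: xs) [a, b] (by simp) (by simp),
      pv_cjoin_append sep (x :: xs) [a ++ sep ++ b] (by simp) (by simp)]
    simp [PySem.Chars.join_cons_cons, PySem.Chars.join_singleton]

-- merging a trailing pair of already-joined groups into one group keeps the joined string
theorem pv_sjoin_merge (X cur ks : List String) (hc : cur ≠ []) (hk : ks ≠ []) :
    PySem.Str.join " " (X ++ [PySem.Str.join " " cur, PySem.Str.join " " ks])
      = PySem.Str.join " " (X ++ [PySem.Str.join " " (cur ++ ks)]) := by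
  apply String.toList_inj.mp
  simp only [PySem.Str.toList_join, List.map_append, List.map_cons, List.map_nil]
  rw [pv_cjoin_append " ".toList (cur.map String.toList) (ks.map String.toList)
    (by simpa using hc) (by simpa using hk)]
  exact pv_cjoin_two _ _ _ _

theorem pv_sjoin_singleton (x : String) : PySem.Str.join " " [x] = x := by
  apply String.toList_inj.mp
  rw [PySem.Str.toList_join]
  simp [PySem.Chars.join_singleton]

-- the fold's flushed blocks join to the same string as one block of all kept lines,
-- and are empty exactly together
theorem pv_fold_invariant (lines : List String) : ∀ bs cur : List String,
    (pvFlush (lines.foldl pvStepA (bs, cur)) = []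
        ↔ pvFlush (bs, cur ++ lines.filter pvHasMarker) = [])
    ∧ PySem.Str.join " " (pvFlush (lines.foldl pvStepA (bs, cur)))
        = PySem.Str.join " " (pvFlush (bs, cur ++ lines.filter pvHasMarker)) := by
  induction lines with
  | nil => intro bs cur; simp
  | cons l ls ih =>
    intro bs cur
    rw [List.foldl_cons, List.filter_cons]
    by_cases hp : pvHasMarker l
    · have hstep : pvStepA (bs, cur) l = (bs, cur ++ [l]) := by simp [pvStepA, hp]
      rw [hstep]
      simpa [hp, List.append_assoc] using ih bs (cur ++ [l])
    · by_cases hc : cur = []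
      · subst hc
        have hstep : pvStepA (bs, ([] : List String)) l = (bs, []) := by simp [pvStepA, hp]
        rw [hstep]
        simpa [hp] using ih bs []
      · have hstep : pvStepA (bs, cur) l
            = (bs ++ [PySem.Str.join " " cur], ([] : List String)) := by
          simp [pvStepA, hp, hc]
        rw [hstep]
        obtain ⟨ih1, ih2⟩ := ih (bs ++ [PySem.Str.join " " cur]) []
        rw [List.nil_append] at ih1 ih2
        by_cases hk : ls.filter pvHasMarker = []
        · rw [hk] at ih1 ih2 ⊢
          simp only [hp, Bool.false_eq_true, if_false, List.append_nil]
          refine ⟨ih1.trans ?_, ih2.trans ?_⟩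
          · simp [pvFlush, hc]
          · simp [pvFlush, hc]
        · simp only [hp, Bool.false_eq_true, if_false]
          have hck : cur ++ ls.filter pvHasMarker ≠ [] := by
            intro h; exact hc (List.append_eq_nil_iff.mp h).1
          refine ⟨ih1.trans ?_, ih2.trans ?_⟩
          · simp [pvFlush, hk, hck]
          · have : pvFlush (bs ++ [PySem.Str.join " " cur], ls.filter pvHasMarker)
                = bs ++ [PySem.Str.join " " cur, PySem.Str.join " " (ls.filter pvHasMarker)] := by
              simp [pvFlush, hk]
            rw [this]
            have h2 : pvFlush (bs, cur ++ ls.filter pvHasMarker)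
                = bs ++ [PySem.Str.join " " (cur ++ ls.filter pvHasMarker)] := by
              simp [pvFlush, hck]
            rw [h2]
            exact pv_sjoin_merge bs cur (ls.filter pvHasMarker) hc hk

-- ===== VERDICT (by name: the statement is the Claim_ definition above) =====
theorem extract_useful_blocks_py_spec : Claim_equal_extract_useful_blocks_py := by
  intro text _
  unfold Spec_extract_useful_blocks_py extract_useful_blocks_py extract_useful_blocks_py_alt
  rw [pv_kept_eq]
  set L := ((PySem.Str.splitlines text).filter
      (fun line => PySem.Str.strip line != "")).map PySem.Str.strip with hL
  obtain ⟨h1, h2⟩ := pv_fold_invariant L [] []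
  rw [List.nil_append] at h1 h2
  show (if pvFlush (L.foldl pvStepA ([], [])) = [] then text
      else PySem.Str.join " " (pvFlush (L.foldl pvStepA ([], []))))
    = (if L.filter pvHasMarker = [] then text
      else PySem.Str.join " " (L.filter pvHasMarker))
  by_cases hk : L.filter pvHasMarker = []
  · rw [hk] at h1
    have hz : pvFlush (L.foldl pvStepA ([], [])) = [] := h1.mpr (by simp [pvFlush])
    rw [if_pos hz, if_pos hk]
  · have hfl : pvFlush (([] : List String), L.filter pvHasMarker)
        = [PySem.Str.join " " (L.filter pvHasMarker)] := by simp [pvFlush, hk]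
    rw [hfl] at h1 h2
    have hne : pvFlush (L.foldl pvStepA ([], [])) ≠ [] := by
      intro h; simp [h] at h1
    rw [if_neg hne, if_neg hk, h2, pv_sjoin_singleton]
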